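-- pv_equiv track=rewrite | github.com/odoo/odoo | venv/Lib/site-packages/reportlab/lib/utils.py | commasplit
-- ===== SOURCE A (Python) =====
-- def isBytes(v):
--     return isinstance(v, bytes)
--
-- def commasplit(s):
--     '''
--     Splits the string s at every unescaped comma and returns the result as a list.
--     To escape a comma, double it. Individual items are stripped.
--     To avoid the ambiguity of 3 successive commas to denote a comma at the beginning
--     or end of an item, add a space between the item seperator and the escaped comma.
--
--     >>> commasplit(u'a,b,c') == [u'a', u'b', u'c']
--     True
--     >>> commasplit('a,, , b , c    ') == [u'a,', u'b', u'c']
--     True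
--     >>> commasplit(u'a, ,,b, c') == [u'a', u',b', u'c']
--     '''
--     if isBytes(s): s = s.decode('utf8')
--     n = len(s)-1
--     s += u' '
--     i = 0
--     r=[u'']
--     while i<=n:
--         if s[i]==u',':
--             if s[i+1]==u',':
--                 r[-1]+=u','
--                 i += 1
--             else:
--                 r[-1] = r[-1].strip()
--                 if i!=n: r.append(u'')
--         else:
--             r[-1] += s[i]
--         i+=1
--     r[-1] = r[-1].strip()
--     return r
-- ===== SOURCE B (Python) =====
-- def commasplit(s):
--     if isinstance(s, bytes):
--         s = s.decode('utf8')
--     # Pass 1: tokenize into alternating text / delimiter (',,' or ',') tokens.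
--     tokens = []
--     buf = ''
--     i = 0
--     while i < len(s):
--         if s[i] == ',':
--             tokens.append(buf)
--             buf = ''
--             if i + 1 < len(s) and s[i + 1] == ',':
--                 tokens.append(',,')
--                 i += 2
--             else:
--                 tokens.append(',')
--                 i += 1
--         else:
--             buf += s[i]
--             i += 1
--     tokens.append(buf)
--     # Pass 2: fold the tokens into items.
--     items = ['']
--     for t in tokens:
--         if t == ',,':
--             items[-1] += ','
--         elif t == ',':
--             items[-1] = items[-1].strip()
--             items.append('')
--         else:
--             items[-1] += t
--     items[-1] = items[-1].strip()
--     # A single unescaped comma at the very end produces no empty trailing item.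
--     if len(tokens) >= 2 and tokens[-1] == '' and tokens[-2] == ',':
--         items.pop()
--     return items
-- ===== Notes on version B (the rewrite author's own statement) =====
-- stated objective: alternative
-- what changed: B replaces A's single indexed character loop (with a padding space and manual index skipping) by a two-pass pipeline: first tokenize the string into alternating text and delimiter tokens (doubled comma preferred over single), then fold the tokens into stripped items, popping the trailing empty item exactly when the token stream ends in a single unescaped comma.
import Mathlib
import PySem

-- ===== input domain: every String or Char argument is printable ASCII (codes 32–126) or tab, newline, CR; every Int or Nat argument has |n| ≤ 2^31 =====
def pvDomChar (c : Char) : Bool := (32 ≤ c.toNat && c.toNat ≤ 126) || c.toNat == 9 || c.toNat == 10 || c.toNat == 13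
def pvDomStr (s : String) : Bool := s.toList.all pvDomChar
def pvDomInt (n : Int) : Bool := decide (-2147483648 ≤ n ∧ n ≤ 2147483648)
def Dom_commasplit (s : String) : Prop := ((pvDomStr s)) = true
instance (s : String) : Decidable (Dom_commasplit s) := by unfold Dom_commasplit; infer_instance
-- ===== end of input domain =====

-- B splits the string in two passes (tokenize into text/',,'/',' tokens, then fold the
-- tokens into stripped items with a final trailing-comma pop) instead of A's single
-- indexed character loop; objective: alternative decomposition, same cost.

-- ===== PORT A =====
-- A's while-loop over indices i ≤ n (s padded with a trailing space so s[i+1] is always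
-- readable) becomes a recursion over the remaining characters: `rest.head? = some ','`
-- is A's `s[i+1] == ','` (the pad ' ' gives head? = none at the end), `rest = []` is
-- A's `i == n`.  r[-1] is the `cur` accumulator, completed items are kept reversed in `done`.
def pvLoopA : List Char → String → List String → String × List String
  | [], cur, done => (cur, done)
  | c :: rest, cur, done =>
      if c = ',' then
        if rest.head? = some ',' then pvLoopA rest.tail (cur ++ ",") done
        else if rest = [] then (PySem.Str.strip cur, done)
        else pvLoopA rest "" (PySem.Str.strip cur :: done)
      else pvLoopA rest (cur.push c) done
  termination_by cs _ _ => cs.length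
  decreasing_by all_goals simp [List.length_tail]

def commasplit (s : String) : List String :=
  let p := pvLoopA s.toList "" []
  (PySem.Str.strip p.1 :: p.2).reverse

-- ===== PORT B =====
-- pass 1 of Source B: split into alternating text / delimiter (",," before ",") tokens
def pvTok : List Char → String → List String
  | [], buf => [buf]
  | c :: rest, buf =>
      if c = ',' then
        if rest.head? = some ',' then buf :: ",," :: pvTok rest.tail ""
        else buf :: "," :: pvTok rest ""
      else pvTok rest (buf.push c)
  termination_by cs _ => cs.length
  decreasing_by all_goals simp [List.length_tail]

-- pass 2 of Source B: fold the tokens into items (current item `cur`, finished items reversed)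
def pvFold : List String → String → List String → String × List String
  | [], cur, done => (cur, done)
  | t :: ts, cur, done =>
      if t = ",," then pvFold ts (cur ++ ",") done
      else if t = "," then pvFold ts "" (PySem.Str.strip cur :: done)
      else pvFold ts (cur ++ t) done

-- Source B's pop test: len(tokens) >= 2 and tokens[-1] == '' and tokens[-2] == ','
def pvPopCond : List String → Bool
  | [] => false
  | [_] => false
  | [a, b] => a == "," && b == ""
  | _ :: b :: c :: r => pvPopCond (b :: c :: r)

def commasplit_alt (s : String) : List String :=
  let ts := pvTok s.toList ""
  let p := pvFold ts "" []
  let items := PySem.Str.strip p.1 :: p.2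
  (if pvPopCond ts then items.tail else items).reverse

-- ===== PRECONDITION & SPEC =====
def Spec_commasplit (s : String) (out : List String) : Prop := out = commasplit_alt s
instance (s : String) (out : List String) : Decidable (Spec_commasplit s out) := by unfold Spec_commasplit; infer_instance

-- ===== CLAIM (what is proved, stated in full; the proofs are below) =====
def Claim_equal_commasplit : Prop := ∀ (s : String), Dom_commasplit s → Spec_commasplit s (commasplit s)

-- ===== LEMMAS AND PROOFS =====

-- B's pipeline after the tokenizer, not yet reversed (proof-side packaging of commasplit_alt)
def pvPost (ts : List String) (cur : String) (done : List String) : List String :=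
  let p := pvFold ts cur done
  let items := PySem.Str.strip p.1 :: p.2
  if pvPopCond ts then items.tail else items

theorem pv_push_append (s t : String) (c : Char) : (s ++ t).push c = s ++ t.push c :=
  String.toList_inj.mp (by simp)

theorem pv_rstrip_idem (l : List Char) :
    PySem.Chars.rstrip (PySem.Chars.rstrip l) = PySem.Chars.rstrip l := by
  simp [PySem.Chars.rstrip, List.dropWhile_idempotent]

theorem pv_lstrip_rstrip (l : List Char) (h : PySem.Chars.lstrip l = l) :
    PySem.Chars.lstrip (PySem.Chars.rstrip l) = PySem.Chars.rstrip l := by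
  have hsuf : PySem.Chars.rstrip l <+: l := by
    simpa [PySem.Chars.rstrip] using
      (List.reverse_prefix.mpr (List.dropWhile_suffix (l := l.reverse) PySem.Chars.isspace))
  cases hr : PySem.Chars.rstrip l with
  | nil => simp [PySem.Chars.lstrip]
  | cons a r =>
      have hl : ∃ t, l = a :: t := by
        rcases hsuf with ⟨t, ht⟩
        rw [hr] at ht
        exact ⟨r ++ t, by simpa using ht.symm⟩
      rcases hl with ⟨t, ht⟩
      have ha : PySem.Chars.isspace a = false := by
        by_contra hsp
        have hsp' : PySem.Chars.isspace a = true := by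
          cases hx : PySem.Chars.isspace a <;> simp_all
        have hdw : List.dropWhile PySem.Chars.isspace l = List.dropWhile PySem.Chars.isspace t := by
          simp [ht, hsp']
        have h' : List.dropWhile PySem.Chars.isspace l = l := h
        rw [hdw, ht] at h'
        have := congrArg List.length h'
        simp at this
        have := List.length_dropWhile_le (p := PySem.Chars.isspace) (l := t)
        omega
      simp [PySem.Chars.lstrip, ha]

theorem pv_strip_idem (s : String) :
    PySem.Str.strip (PySem.Str.strip s) = PySem.Str.strip s := by
  apply String.toList_inj.mp
  simp only [PySem.Str.strip, PySem.Chars.strip, String.toList_ofList]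
  rw [pv_lstrip_rstrip _ (by simp [PySem.Chars.lstrip, List.dropWhile_idempotent])]
  exact pv_rstrip_idem _

theorem pvTok_ne_nil (cs : List Char) : ∀ (buf : String), pvTok cs buf ≠ [] := by
  induction cs with
  | nil => intro buf; simp [pvTok]
  | cons c rest ih =>
      intro buf
      rw [pvTok]
      split_ifs <;> simp [ih]

theorem pvTok_singleton (cs : List Char) :
    ∀ (buf : String) (x : String), pvTok cs buf = [x] → x.toList = buf.toList ++ cs := by
  induction cs with
  | nil => intro buf x h; simp [pvTok] at h; simp [h]
  | cons c rest ih =>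
      intro buf x h
      rw [pvTok] at h
      split_ifs at h with h1 h2
      · exact absurd h (by simp)
      · exact absurd h (by simp)
      · have := ih _ _ h
        simpa using this

theorem pv_ne_dd (buf : String) (hbuf : (',' : Char) ∉ buf.toList) : buf ≠ ",," := by
  intro h; subst h; simp at hbuf
theorem pv_ne_d (buf : String) (hbuf : (',' : Char) ∉ buf.toList) : buf ≠ "," := by
  intro h; subst h; simp at hbuf

theorem pvPopCond_skip_comma (a : String) (ts : List String) (h : ts ≠ [])
    (hx : ∀ x, ts = [x] → x ≠ "") : pvPopCond (a :: "," :: ts) = pvPopCond ts := by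
  cases ts with
  | nil => contradiction
  | cons x r =>
      cases r with
      | nil =>
          have := hx x rfl
          simp [pvPopCond, this]
      | cons y r' => simp [pvPopCond]

-- the simulation: B's post-tokenizer pipeline on (pvTok cs buf) equals A's loop on cs
-- with `buf` flushed into the current item (buf never contains a comma)
theorem pv_key : ∀ (n : Nat) (cs : List Char), cs.length ≤ n →
    ∀ (buf cur : String) (done : List String), (',' : Char) ∉ buf.toList →
    pvPost (pvTok cs buf) cur done =
      PySem.Str.strip (pvLoopA cs (cur ++ buf) done).1 :: (pvLoopA cs (cur ++ buf) done).2 := by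
  intro n
  induction n with
  | zero =>
      intro cs hlen buf cur done hbuf
      have hcs : cs = [] := by cases cs <;> simp_all
      subst hcs
      simp [pvTok, pvPost, pvFold, pv_ne_dd buf hbuf, pv_ne_d buf hbuf, pvPopCond, pvLoopA]
  | succ n ih =>
      intro cs hlen buf cur done hbuf
      cases cs with
      | nil =>
          simp [pvTok, pvPost, pvFold, pv_ne_dd buf hbuf, pv_ne_d buf hbuf, pvPopCond, pvLoopA]
      | cons c rest =>
          have hrest : rest.length ≤ n := by simp at hlen; omega
          by_cases hc : c = ','
          · subst hc
            by_cases hh : rest.head? = some ','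
            · -- escaped comma: token ",,", A appends a literal comma and skips one char
              have htail : rest.tail.length ≤ n := by
                have := List.length_tail (l := rest); omega
              have hne := pvTok_ne_nil rest.tail ""
              have hpop : pvPopCond (buf :: ",," :: pvTok rest.tail "") =
                  pvPopCond (pvTok rest.tail "") := by
                cases hts : pvTok rest.tail "" with
                | nil => exact absurd hts hne
                | cons x r =>
                    cases r with
                    | nil => simp [pvPopCond]
                    | cons y r' => simp [pvPopCond]
              have hfold : pvFold (buf :: ",," :: pvTok rest.tail "") cur done =
                  pvFold (pvTok rest.tail "") ((cur ++ buf) ++ ",") done := by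
                rw [pvFold, if_neg (pv_ne_dd buf hbuf), if_neg (pv_ne_d buf hbuf), pvFold]
                simp
              have hstep : pvPost (pvTok (',' :: rest) buf) cur done =
                  pvPost (pvTok rest.tail "") ((cur ++ buf) ++ ",") done := by
                rw [pvTok, if_pos rfl, if_pos hh]
                simp only [pvPost, hpop, hfold]
              rw [hstep, ih rest.tail htail "" ((cur ++ buf) ++ ",") done (by simp)]
              rw [pvLoopA]
              simp [hh]
            · by_cases hr : rest = []
              · -- single comma at the very end: A strips and stops, B pops the empty item
                subst hr
                rw [pvTok, if_pos rfl, if_neg hh, pvTok]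
                rw [pvLoopA]
                simp only [if_neg hh]
                simp only [pvPost, pvFold, if_neg (pv_ne_dd buf hbuf), if_neg (pv_ne_d buf hbuf)]
                simp [pvPopCond, pv_strip_idem]
              · -- internal single comma: close the current item, open a new one
                have hne := pvTok_ne_nil rest ""
                have hx : ∀ x, pvTok rest "" = [x] → x ≠ "" := by
                  intro x hxx hx0
                  have := pvTok_singleton rest "" x hxx
                  rw [hx0] at this
                  simp at this
                  exact hr this
                have hpop : pvPopCond (buf :: "," :: pvTok rest "") =
                    pvPopCond (pvTok rest "") := pvPopCond_skip_comma buf _ hne hx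
                have hfold : pvFold (buf :: "," :: pvTok rest "") cur done =
                    pvFold (pvTok rest "") "" (PySem.Str.strip (cur ++ buf) :: done) := by
                  rw [pvFold, if_neg (pv_ne_dd buf hbuf), if_neg (pv_ne_d buf hbuf), pvFold]
                  simp
                have hstep : pvPost (pvTok (',' :: rest) buf) cur done =
                    pvPost (pvTok rest "") "" (PySem.Str.strip (cur ++ buf) :: done) := by
                  rw [pvTok, if_pos rfl, if_neg hh]
                  simp only [pvPost, hpop, hfold]
                rw [hstep, ih rest hrest "" "" (PySem.Str.strip (cur ++ buf) :: done) (by simp)]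
                rw [pvLoopA]
                simp [hh, hr]
          · -- ordinary character: goes into the current text token / item
            have hbuf' : (',' : Char) ∉ (buf.push c).toList := by
              simp [hbuf]; exact fun h => hc h.symm
            have hstep : pvTok (c :: rest) buf = pvTok rest (buf.push c) := by
              rw [pvTok]; simp [hc]
            rw [hstep, ih rest hrest (buf.push c) cur done hbuf']
            rw [pvLoopA]
            simp [hc, pv_push_append]

-- ===== VERDICT (by name: the statement is the Claim_ definition above) =====
theorem commasplit_spec : Claim_equal_commasplit := by
  intro s _
  show commasplit s = commasplit_alt s
  have h := pv_key s.toList.length s.toList (le_refl _) "" "" [] (by simp)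
  simp only [String.append_empty] at h
  have halt : commasplit_alt s = (pvPost (pvTok s.toList "") "" []).reverse := rfl
  rw [halt, h]
  rfl
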